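-- pv_equiv track=rewrite | github.com/karolbujnowski23/ai_dev_projects | zadania/Z0203/agent.py | smart_filter
-- ===== SOURCE A (Python) =====
-- def smart_filter(lines):
--     """Keeps the first and last occurrence of every identical message block (boundary filtering)."""
--     if not lines: return []
--     filtered = []
--
--     # Pre-parse messages for comparison
--     parsed = []
--     for line in lines:
--         msg = line[21:].strip() if len(line) > 21 else line
--         parsed.append(msg)
--
--     for i in range(len(lines)):
--         curr_msg = parsed[i]
--         prev_msg = parsed[i-1] if i > 0 else None
--         nxt_msg = parsed[i+1] if i < len(lines)-1 else None
--
--         # Keep if it's the start or end of a block of identical messages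
--         # OR if it's a CRIT log (though CRIT logs are usually important anyway)
--         if curr_msg != prev_msg or curr_msg != nxt_msg or "[CRIT]" in lines[i]:
--             filtered.append(lines[i])
--
--     return filtered
-- ===== SOURCE B (Python) =====
-- def smart_filter(lines):
--     """Run-based boundary filter: group consecutive lines by parsed message,
--     emit each run's first and last line plus interior [CRIT] lines."""
--     def parse(line):
--         return line[21:].strip() if len(line) > 21 else line
--
--     # Build runs of consecutive lines sharing the same parsed message.
--     runs = []
--     for line in lines:
--         key = parse(line)
--         if runs and runs[-1][0] == key:
--             runs[-1][1].append(line)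
--         else:
--             runs.append((key, [line]))
--
--     out = []
--     for _, run in runs:
--         if len(run) == 1:
--             out.append(run[0])
--         else:
--             out.append(run[0])
--             out.extend(l for l in run[1:-1] if "[CRIT]" in l)
--             out.append(run[-1])
--     return out
-- ===== Notes on version B (the rewrite author's own statement) =====
-- stated objective: alternative
-- what changed: A tests each index against its parsed neighbours (prev/next lookups into a pre-parsed array); B instead groups consecutive lines into runs with equal parsed messages in one pass and emits each run's first and last line plus interior [CRIT] lines.
import Mathlib
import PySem

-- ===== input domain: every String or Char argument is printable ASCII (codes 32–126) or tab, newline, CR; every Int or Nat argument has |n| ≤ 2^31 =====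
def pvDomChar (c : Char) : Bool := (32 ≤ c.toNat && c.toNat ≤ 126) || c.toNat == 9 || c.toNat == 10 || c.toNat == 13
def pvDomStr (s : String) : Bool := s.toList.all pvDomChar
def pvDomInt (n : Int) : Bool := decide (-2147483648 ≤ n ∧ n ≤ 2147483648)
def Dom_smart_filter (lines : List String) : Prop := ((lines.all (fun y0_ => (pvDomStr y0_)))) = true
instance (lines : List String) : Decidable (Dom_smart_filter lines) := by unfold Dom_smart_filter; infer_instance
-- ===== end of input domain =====

-- B replaces A's index-based prev/next neighbour test by grouping consecutive equal-message
-- runs once and emitting each run's boundary lines (plus interior [CRIT] lines): alternative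
-- decomposition, same asymptotic cost.


-- ===== PORT A =====
-- msg = line[21:].strip() if len(line) > 21 else line   (the parsing expression both Pythons share)
def pvParse (line : String) : String :=
  if PySem.Str.len line > 21 then PySem.Str.strip (PySem.Str.slice line (some 21) none) else line

def smart_filter (lines : List String) : List String :=
  if lines = [] then []
  else
    -- parsed = []; for line in lines: parsed.append(msg)
    let parsed := lines.foldl (fun acc line => acc ++ [pvParse line]) []
    -- for i in range(len(lines)): keep lines[i] when curr ≠ prev or curr ≠ next or "[CRIT]" in it
    (PySem.List.pyRange 0 (lines.length : Int) 1).foldl (fun filtered i =>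
      let curr := PySem.List.pyGetD parsed i ""
      let prev : Option String := if i > 0 then some (PySem.List.pyGetD parsed (i - 1) "") else none
      let nxt : Option String := if i < (lines.length : Int) - 1 then some (PySem.List.pyGetD parsed (i + 1) "") else none
      if some curr ≠ prev ∨ some curr ≠ nxt ∨ PySem.Str.isIn "[CRIT]" (PySem.List.pyGetD lines i "") = true then
        filtered ++ [PySem.List.pyGetD lines i ""]
      else filtered) []

-- ===== PORT B =====
-- per-run emission: first line, interior [CRIT] lines, last line (once for a singleton run)
def pvEmitRun (run : List String) : List String :=
  if run.length = 1 then [PySem.List.pyGetD run 0 ""]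
  else
    [PySem.List.pyGetD run 0 ""] ++
    (PySem.List.slice run (some 1) (some (-1))).filter (fun l => PySem.Str.isIn "[CRIT]" l) ++
    [PySem.List.pyGetD run (-1) ""]

-- runs: append to the last run when its key matches, else open a new run
def pvStep (runs : List (String × List String)) (line : String) : List (String × List String) :=
  let key := pvParse line
  match runs.getLast? with
  | some (k, r) => if k = key then runs.dropLast ++ [(k, r ++ [line])] else runs ++ [(key, [line])]
  | none => runs ++ [(key, [line])]

def smart_filter_alt (lines : List String) : List String :=
  let runs := lines.foldl pvStep []
  runs.foldl (fun out kr => out ++ pvEmitRun kr.2) []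

-- ===== PRECONDITION & SPEC =====
def Spec_smart_filter (lines : List String) (out : List String) : Prop := out = smart_filter_alt lines
instance (lines : List String) (out : List String) : Decidable (Spec_smart_filter lines out) := by unfold Spec_smart_filter; infer_instance

-- ===== CLAIM (what is proved, stated in full; the proofs are below) =====
def Claim_equal_smart_filter : Prop := ∀ (lines : List String), Dom_smart_filter lines → Spec_smart_filter lines (smart_filter lines)

-- ===== LEMMAS AND PROOFS =====

-- The common recursive specification: walk the list with p = the parsed message of the
-- previous line (none at the start), keeping a line when its parsed message differs from
-- the previous or the next one, or when it contains "[CRIT]".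
def pvG : Option String → List String → List String
  | _, [] => []
  | p, l :: rest =>
    (if some (pvParse l) ≠ p ∨ some (pvParse l) ≠ (rest.head?.map pvParse) ∨
        PySem.Str.isIn "[CRIT]" l = true then [l] else []) ++ pvG (some (pvParse l)) rest

-- A's per-index keep condition on Nat indices, previous message generalized to p at index 0
def pvCond (p : Option String) (lines : List String) (k : Nat) : Bool :=
  let parsed := lines.map pvParse
  let curr := parsed.getD k ""
  let prev : Option String := if k > 0 then some (parsed.getD (k - 1) "") else p
  let nxt : Option String := if k < lines.length - 1 then some (parsed.getD (k + 1) "") else none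
  decide (some curr ≠ prev ∨ some curr ≠ nxt ∨ PySem.Str.isIn "[CRIT]" (lines.getD k "") = true)

-- A's keep condition exactly as the port states it, on Int indices
def pvCondInt (lines : List String) (i : Int) : Bool :=
  let parsed := lines.map pvParse
  let curr := PySem.List.pyGetD parsed i ""
  let prev : Option String := if i > 0 then some (PySem.List.pyGetD parsed (i - 1) "") else none
  let nxt : Option String := if i < (lines.length : Int) - 1 then some (PySem.List.pyGetD parsed (i + 1) "") else none
  decide (some curr ≠ prev ∨ some curr ≠ nxt ∨ PySem.Str.isIn "[CRIT]" (PySem.List.pyGetD lines i "") = true)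

theorem pvCond_zero (p : Option String) (l : String) (rest : List String) :
    pvCond p (l :: rest) 0 =
      decide (some (pvParse l) ≠ p ∨ some (pvParse l) ≠ (rest.head?.map pvParse) ∨
        PySem.Str.isIn "[CRIT]" l = true) := by
  cases rest <;> simp [pvCond]

theorem pvCond_succ (p : Option String) (l : String) (rest : List String) (k : Nat)
    (hk : k < rest.length) :
    pvCond p (l :: rest) (k + 1) = pvCond (some (pvParse l)) rest k := by
  cases k with
  | zero =>
    by_cases h2 : 1 < rest.length
    · simp [pvCond, h2, show 0 < rest.length - 1 by omega]
    · simp [pvCond, h2, show ¬ (0 < rest.length - 1) by omega]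
  | succ j =>
    by_cases h2 : j + 2 < rest.length
    · simp [pvCond, h2, show j + 1 < rest.length - 1 by omega]
    · simp [pvCond, h2, show ¬ (j + 1 < rest.length - 1) by omega]

theorem pvA_eq_filter (lines : List String) : ∀ (p : Option String),
    ((List.range lines.length).filter (pvCond p lines)).map (fun k => lines.getD k "") = pvG p lines := by
  induction lines with
  | nil => intro p; simp [pvG]
  | cons l rest ih =>
    intro p
    have hfilter : List.filter (fun k => pvCond p (l :: rest) (k + 1)) (List.range rest.length)
        = List.filter (pvCond (some (pvParse l)) rest) (List.range rest.length) :=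
      List.filter_congr (fun k hk => pvCond_succ p l rest k (List.mem_range.mp hk))
    have hrest : (List.filter (pvCond p (l :: rest)) ((List.range rest.length).map Nat.succ)).map
        (fun k => (l :: rest).getD k "") = pvG (some (pvParse l)) rest := by
      rw [List.filter_map, List.map_map]
      rw [show (pvCond p (l :: rest)) ∘ Nat.succ = fun k => pvCond p (l :: rest) (k + 1) from rfl,
        hfilter, ← ih (some (pvParse l))]
      exact List.map_congr_left (fun k _ => by simp [Function.comp])
    rw [show (l :: rest).length = rest.length + 1 from rfl, List.range_succ_eq_map, List.filter_cons]
    by_cases hc : some (pvParse l) ≠ p ∨ some (pvParse l) ≠ (rest.head?.map pvParse) ∨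
        PySem.Str.isIn "[CRIT]" l = true
    · rw [if_pos (by rw [pvCond_zero]; exact decide_eq_true hc)]
      simp only [List.map_cons, List.getD_cons_zero]
      rw [hrest]
      simp only [pvG]
      rw [if_pos hc]
      rfl
    · rw [if_neg (by rw [pvCond_zero, decide_eq_false hc]; simp)]
      rw [hrest]
      simp only [pvG]
      rw [if_neg hc]
      rfl

theorem pvA_fold (lines : List String) (hne : lines ≠ []) :
    smart_filter lines =
      ((PySem.List.pyRange 0 (lines.length : Int) 1).filter (pvCondInt lines)).map
        (fun i => PySem.List.pyGetD lines i "") := by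
  unfold smart_filter
  rw [if_neg hne]
  simp only [PySem.List.foldl_append_singleton_eq_map, List.nil_append]
  have hfun : (fun (filtered : List String) (i : Int) =>
        let curr := PySem.List.pyGetD (lines.map pvParse) i ""
        let prev : Option String := if i > 0 then some (PySem.List.pyGetD (lines.map pvParse) (i - 1) "") else none
        let nxt : Option String := if i < (lines.length : Int) - 1 then some (PySem.List.pyGetD (lines.map pvParse) (i + 1) "") else none
        if some curr ≠ prev ∨ some curr ≠ nxt ∨ PySem.Str.isIn "[CRIT]" (PySem.List.pyGetD lines i "") = true then
          filtered ++ [PySem.List.pyGetD lines i ""]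
        else filtered)
      = (fun filtered i => if pvCondInt lines i = true then filtered ++ [PySem.List.pyGetD lines i ""] else filtered) := by
    funext filtered i
    simp only [pvCondInt, decide_eq_true_eq]
  rw [hfun, PySem.List.foldl_append_if, List.nil_append]

theorem pvCondInt_natCast (lines : List String) (k : Nat) (hk : k < lines.length) :
    pvCondInt lines (k : Int) = pvCond none lines k := by
  cases k with
  | zero =>
    by_cases h2 : 0 < lines.length - 1
    · simp [pvCondInt, pvCond, h2,
        show ((0 : Int) < (lines.length : Int) - 1) from by omega]
    · simp [pvCondInt, pvCond, h2,
        show ¬ ((0 : Int) < (lines.length : Int) - 1) from by omega]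
  | succ j =>
    have g0 : PySem.List.pyGetD (lines.map pvParse) ((j : Int) + 1 - 1) "" = (lines.map pvParse).getD j "" := by
      rw [show ((j : Int) + 1 - 1) = ((j : Nat) : Int) by ring]
      exact PySem.List.pyGetD_natCast _ _ _
    have g1 : PySem.List.pyGetD (lines.map pvParse) ((j : Int) + 1) "" = (lines.map pvParse).getD (j + 1) "" := by
      rw [show ((j : Int) + 1) = ((j + 1 : Nat) : Int) by push_cast; ring]
      exact PySem.List.pyGetD_natCast _ _ _
    have g2 : PySem.List.pyGetD (lines.map pvParse) ((j : Int) + 1 + 1) "" = (lines.map pvParse).getD (j + 1 + 1) "" := by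
      rw [show ((j : Int) + 1 + 1) = ((j + 1 + 1 : Nat) : Int) by push_cast; ring]
      exact PySem.List.pyGetD_natCast _ _ _
    have g3 : PySem.List.pyGetD lines ((j : Int) + 1) "" = lines.getD (j + 1) "" := by
      rw [show ((j : Int) + 1) = ((j + 1 : Nat) : Int) by push_cast; ring]
      exact PySem.List.pyGetD_natCast _ _ _
    by_cases h2 : j + 1 < lines.length - 1
    · simp [pvCondInt, pvCond, h2, g1, g2, g3,
        show ((j : Int) + 1 < (lines.length : Int) - 1) from by omega]
    · simp only [pvCondInt, pvCond, Nat.cast_add, Nat.cast_one]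
      rw [if_neg (show ¬ ((j : Int) + 1 < (lines.length : Int) - 1) from by omega),
        if_neg h2]
      simp [g0, g1, g3]

theorem pvInt_to_nat (lines : List String) :
    ((PySem.List.pyRange 0 (lines.length : Int) 1).filter (pvCondInt lines)).map
        (fun i => PySem.List.pyGetD lines i "")
      = ((List.range lines.length).filter (pvCond none lines)).map (fun k => lines.getD k "") := by
  rw [PySem.List.pyRange_one]
  simp only [sub_zero, Int.toNat_natCast, zero_add]
  rw [List.filter_map, List.map_map]
  have hf : List.filter ((pvCondInt lines) ∘ fun k : Nat => (k : Int)) (List.range lines.length)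
      = List.filter (pvCond none lines) (List.range lines.length) :=
    List.filter_congr (fun k hk => pvCondInt_natCast lines k (List.mem_range.mp hk))
  rw [hf]
  exact List.map_congr_left (fun k _ => by
    simp [Function.comp, PySem.List.pyGetD_natCast])

theorem pvA_eq_g (lines : List String) : smart_filter lines = pvG none lines := by
  cases lines with
  | nil => rfl
  | cons l rest =>
    rw [pvA_fold (l :: rest) (by simp), pvInt_to_nat, pvA_eq_filter]

-- ---- B side ----

-- the run decomposition pvStep's fold computes, in recursive form
def pvBuild : String → List String → List String → List (String × List String)
  | k, r, [] => [(k, r)]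
  | k, r, x :: xs =>
    if k = pvParse x then pvBuild k (r ++ [x]) xs else (k, r) :: pvBuild (pvParse x) [x] xs

theorem pvFoldl_step (rest : List String) : ∀ (done : List (String × List String)) (k : String) (r : List String),
    List.foldl pvStep (done ++ [(k, r)]) rest = done ++ pvBuild k r rest := by
  induction rest with
  | nil => intro done k r; simp [pvBuild]
  | cons x xs ih =>
    intro done k r
    rw [List.foldl_cons]
    have hstep : pvStep (done ++ [(k, r)]) x =
        if k = pvParse x then done ++ [(k, r ++ [x])] else (done ++ [(k, r)]) ++ [(pvParse x, [x])] := by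
      unfold pvStep
      rw [List.getLast?_concat]
      by_cases h : k = pvParse x
      · simp [h]
      · simp [h]
    by_cases h : k = pvParse x
    · rw [hstep, if_pos h, ih]
      simp only [pvBuild, if_pos h]
    · rw [hstep, if_neg h, ih]
      simp only [pvBuild, if_neg h, List.append_assoc, List.singleton_append]

theorem pvGet_zero {α : Type} (a : α) (r : List α) (d : α) :
    PySem.List.pyGetD (a :: r) 0 d = a := by
  simp [PySem.List.pyGetD, PySem.List.pyGet?, PySem.List.pyIdx?]

theorem pvGet_neg_one {α : Type} (a : α) (r : List α) (d : α) :
    PySem.List.pyGetD (a :: r) (-1) d = (a :: r).getLastD d := by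
  simp [PySem.List.pyGetD, PySem.List.pyGet?, PySem.List.pyIdx?, List.getLastD_eq_getLast?,
    List.getLast?_eq_getElem?]

theorem pvSlice_one_neg_one {α : Type} (a : α) (r : List α) :
    PySem.List.slice (a :: r) (some 1) (some (-1)) = r.dropLast := by
  simp [PySem.List.slice, PySem.List.clampIdx, List.dropLast_eq_take,
    if_neg (by omega : ¬((r.length : Int) < 0))]

theorem pvRin (k : String) (r' : List String) : ∀ (tail : List String),
    (∀ y ∈ r', pvParse y = k) → (∀ t ∈ tail.head?, pvParse t ≠ k) →
    pvG (some k) (r' ++ tail) =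
      (r'.dropLast.filter (fun l => PySem.Str.isIn "[CRIT]" l)) ++ r'.getLast?.toList
        ++ pvG (some k) tail := by
  induction r' with
  | nil => intro tail _ _; simp
  | cons y ys ih =>
    intro tail hall ht
    have hy : pvParse y = k := hall y (by simp)
    cases ys with
    | nil =>
      simp only [List.singleton_append, pvG]
      have hnxt : some (pvParse y) ≠ tail.head?.map pvParse := by
        cases htl : tail.head? with
        | none => simp
        | some t =>
          have hht := ht t (by simp [htl])
          simp only [Option.map_some, ne_eq, Option.some.injEq, hy]
          exact fun hc => hht hc.symm
      rw [if_pos (Or.inr (Or.inl hnxt)), hy]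
      simp
    | cons z zs =>
      have hz : pvParse z = k := hall z (by simp)
      have hcond : (some (pvParse y) ≠ some k ∨
          some (pvParse y) ≠ (((z :: zs) ++ tail).head?.map pvParse) ∨
          PySem.Str.isIn "[CRIT]" y = true) ↔ PySem.Str.isIn "[CRIT]" y = true := by
        simp [hy, hz]
      have hrec := ih tail (fun a ha => hall a (by simp [ha])) ht
      by_cases hcrit : PySem.Str.isIn "[CRIT]" y = true
      · rw [show (y :: z :: zs) ++ tail = y :: ((z :: zs) ++ tail) from rfl]
        simp only [pvG]
        rw [if_pos (hcond.mpr hcrit), hy, hrec]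
        have hcrit' : PySem.Chars.isIn ['[', 'C', 'R', 'I', 'T', ']'] y.toList = true := by
          simpa using hcrit
        simp [List.dropLast, hcrit']
      · rw [show (y :: z :: zs) ++ tail = y :: ((z :: zs) ++ tail) from rfl]
        simp only [pvG]
        rw [if_neg (fun hx => hcrit (hcond.mp hx)), hy, hrec]
        have hcrit' : PySem.Chars.isIn ['[', 'C', 'R', 'I', 'T', ']'] y.toList = false := by
          simpa using hcrit
        simp [List.dropLast, hcrit']

theorem pvRun (k a : String) (r' tail : List String) (p : Option String)
    (ha : pvParse a = k) (hall : ∀ y ∈ r', pvParse y = k) (hp : p ≠ some k)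
    (ht : ∀ t ∈ tail.head?, pvParse t ≠ k) :
    pvG p ((a :: r') ++ tail) = pvEmitRun (a :: r') ++ pvG (some k) tail := by
  rw [show (a :: r') ++ tail = a :: (r' ++ tail) from rfl]
  simp only [pvG]
  rw [if_pos (Or.inl (by rw [ha]; exact fun h => hp h.symm)), ha]
  rw [pvRin k r' tail hall ht]
  cases r' with
  | nil => simp [pvEmitRun]
  | cons b bs =>
    have h2 : ¬ ((a :: b :: bs).length = 1) := by simp
    rw [show pvEmitRun (a :: b :: bs) =
        [PySem.List.pyGetD (a :: b :: bs) 0 ""] ++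
        (PySem.List.slice (a :: b :: bs) (some 1) (some (-1))).filter
          (fun l => PySem.Str.isIn "[CRIT]" l) ++
        [PySem.List.pyGetD (a :: b :: bs) (-1) ""] from by rw [pvEmitRun, if_neg h2]]
    rw [pvGet_zero, pvGet_neg_one, pvSlice_one_neg_one]
    simp [List.getLastD_eq_getLast?, List.getLast?_cons_cons]
    cases hbs : (b :: bs).getLast? with
    | none => simp at hbs
    | some z => simp

theorem pvBuild_emit (rest : List String) : ∀ (k a : String) (r' : List String) (p : Option String),
    pvParse a = k → (∀ y ∈ r', pvParse y = k) → p ≠ some k →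
    ((pvBuild k (a :: r') rest).flatMap fun kr => pvEmitRun kr.2) = pvG p ((a :: r') ++ rest) := by
  induction rest with
  | nil =>
    intro k a r' p ha hall hp
    simp only [pvBuild, List.flatMap_cons, List.flatMap_nil, List.append_nil]
    have h := pvRun k a r' [] p ha hall hp (by simp)
    rw [List.append_nil, show pvG (some k) [] = [] from rfl, List.append_nil] at h
    exact h.symm
  | cons x xs ih =>
    intro k a r' p ha hall hp
    by_cases h : k = pvParse x
    · simp only [pvBuild, if_pos h]
      have hall' : ∀ y ∈ r' ++ [x], pvParse y = k := by
        intro y hy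
        rcases List.mem_append.mp hy with h1 | h1
        · exact hall y h1
        · simp at h1; rw [h1, ← h]
      have := ih k a (r' ++ [x]) p ha hall' hp
      rw [show a :: (r' ++ [x]) = (a :: r') ++ [x] from rfl] at this
      rw [this, List.append_assoc, List.singleton_append]
    · simp only [pvBuild, if_neg h, List.flatMap_cons]
      rw [ih (pvParse x) x [] (some k) rfl (by simp)
        (by simp only [ne_eq, Option.some.injEq]; exact h)]
      rw [pvRun k a r' (x :: xs) p ha hall hp
        (by
          intro t htl
          simp only [List.head?_cons, Option.mem_def, Option.some.injEq] at htl
          subst htl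
          exact fun hc => h hc.symm)]
      rfl

theorem pvB_eq_g (lines : List String) : smart_filter_alt lines = pvG none lines := by
  cases lines with
  | nil => rfl
  | cons l rest =>
    unfold smart_filter_alt
    simp only [PySem.List.foldl_append_eq_flatMap, List.nil_append, List.foldl_cons]
    rw [show pvStep [] l = [] ++ [(pvParse l, [l])] from by simp [pvStep]]
    rw [pvFoldl_step, List.nil_append]
    rw [pvBuild_emit rest (pvParse l) l [] none rfl (by simp) (by simp)]
    rfl

-- ===== VERDICT (by name: the statement is the Claim_ definition above) =====
theorem smart_filter_spec : Claim_equal_smart_filter := by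
  intro lines _
  unfold Spec_smart_filter
  rw [pvA_eq_g, pvB_eq_g]
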